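-- pv_equiv track=rewrite | github.com/dollarser/MyLeetCode | python/单调栈/p84.py | largestRectangleArea1
-- ===== SOURCE A (Python) =====
-- from typing import List
--
-- def largestRectangleArea1(heights: List[int]) -> int:
--     '''
--     暴力法：
--         每个柱子可以和他左右两边不小于自己的柱子组成一个立方体
--         高即是该柱子
--         宽是right-left-1
--     '''
--     cnt = 0
--     for i in range(len(heights)):
--         left = i - 1
--         right = i + 1
--         while left >= 0 and heights[left] >= heights[i]:
--             left -= 1
--         while right < len(heights) and heights[right] >= heights[i]:
--             right += 1
--         h = heights[i]
--         w = right - left - 1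
--
--         cnt += h * w
--     return cnt
-- ===== SOURCE B (Python) =====
-- from typing import List
--
-- def largestRectangleArea1(heights: List[int]) -> int:
--     # Monotonic stacks give each bar's previous/next strictly-smaller boundary in O(n).
--     n = len(heights)
--     left = []
--     stack = []  # pairs (index, height), heights strictly increasing
--     for i, h in enumerate(heights):
--         while stack and stack[-1][1] >= h:
--             stack.pop()
--         left.append(stack[-1][0] if stack else -1)
--         stack.append((i, h))
--     right_rev = []
--     stack = []
--     for i in range(n - 1, -1, -1):
--         h = heights[i]
--         while stack and stack[-1][1] >= h:
--             stack.pop()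
--         right_rev.append(stack[-1][0] if stack else n)
--         stack.append((i, h))
--     right = right_rev[::-1]
--     return sum(h * (r - l - 1) for h, l, r in zip(heights, left, right))
-- ===== Notes on version B (the rewrite author's own statement) =====
-- stated objective: faster
-- what changed: Replaced A's per-bar linear scans for the previous/next strictly-smaller neighbour by two monotonic-stack passes that compute all left and right boundaries, then one zipped summation.
import Mathlib
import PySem

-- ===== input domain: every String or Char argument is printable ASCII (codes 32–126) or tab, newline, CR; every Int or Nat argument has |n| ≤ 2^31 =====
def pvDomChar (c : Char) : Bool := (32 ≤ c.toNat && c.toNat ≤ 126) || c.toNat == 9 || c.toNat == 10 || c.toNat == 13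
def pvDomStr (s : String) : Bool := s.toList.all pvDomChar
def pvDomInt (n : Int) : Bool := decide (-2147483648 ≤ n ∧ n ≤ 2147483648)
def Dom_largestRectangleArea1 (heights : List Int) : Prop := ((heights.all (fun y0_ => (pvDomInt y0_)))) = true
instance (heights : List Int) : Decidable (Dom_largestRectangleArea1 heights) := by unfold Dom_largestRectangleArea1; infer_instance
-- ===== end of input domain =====

-- B replaces A's per-bar linear scans for the strictly-smaller boundaries by two
-- monotonic-stack passes (objective: faster, O(n^2) -> O(n)).

-- ===== PORT A =====
-- A's inner 'while left >= 0 and heights[left] >= heights[i]' walks the prefix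
-- right-to-left: ported as structural recursion over the REVERSED prefix, carrying
-- the absolute index l (exact: the k-th element of (take i).reverse is heights[i-1-k]).
def goLA (x : Int) : List Int → Int → Int
  | [], l => l
  | a :: rp, l => if a ≥ x then goLA x rp (l - 1) else l

-- A's inner 'while right < len and heights[right] >= heights[i]' walks the suffix
-- left-to-right: recursion over drop (i+1), carrying the absolute index r.
def goRA (x : Int) : List Int → Int → Int
  | [], r => r
  | a :: rest, r => if a ≥ x then goRA x rest (r + 1) else r

def largestRectangleArea1 (heights : List Int) : Int :=
  (List.range heights.length).foldl (fun cnt i =>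
    let h := heights.getD i 0
    let left := goLA h ((heights.take i).reverse) ((i : Int) - 1)
    let right := goRA h (heights.drop (i + 1)) ((i : Int) + 1)
    cnt + h * (right - left - 1)) 0

-- ===== PORT B =====
-- 'while stack and stack[-1][1] >= h: stack.pop()'
def popAll (x : Int) : List (Int × Int) → List (Int × Int)
  | [] => []
  | (j, v) :: s => if v ≥ x then popAll x s else (j, v) :: s

-- 'stack[-1][0] if stack else d'
def topIdx (d : Int) : List (Int × Int) → Int
  | [] => d
  | (j, _) :: _ => j

-- forward pass: left boundaries (stack holds (index, height))
def passL (i : Int) (stack : List (Int × Int)) : List Int → List Int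
  | [] => []
  | h :: rest =>
    let s := popAll h stack
    topIdx (-1) s :: passL (i + 1) ((i, h) :: s) rest

-- backward pass (over the reversed list): right boundaries, in reversed order
def passR (n : Int) (i : Int) (stack : List (Int × Int)) : List Int → List Int
  | [] => []
  | h :: rest =>
    let s := popAll h stack
    topIdx n s :: passR n (i - 1) ((i, h) :: s) rest

def largestRectangleArea1_alt (heights : List Int) : Int :=
  let n : Int := heights.length
  let left := passL 0 [] heights
  let right := (passR n (n - 1) [] heights.reverse).reverse
  (heights.zip (left.zip right)).foldl (fun c p => c + p.1 * (p.2.2 - p.2.1 - 1)) 0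

-- ===== PRECONDITION & SPEC =====
def Spec_largestRectangleArea1 (heights : List Int) (out : Int) : Prop := out = largestRectangleArea1_alt heights
instance (heights : List Int) (out : Int) : Decidable (Spec_largestRectangleArea1 heights out) := by unfold Spec_largestRectangleArea1; infer_instance

-- ===== CLAIM (what is proved, stated in full; the proofs are below) =====
def Claim_equal_largestRectangleArea1 : Prop := ∀ (heights : List Int), Dom_largestRectangleArea1 heights → Spec_largestRectangleArea1 heights (largestRectangleArea1 heights)

-- ===== LEMMAS AND PROOFS =====

-- common reference: for each bar (at absolute index rp.length, reversed prefix rp,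
-- suffix rest) add h * (right - left - 1) computed by the linear scans
def refSum (rp : List Int) : List Int → Int
  | [] => 0
  | h :: rest =>
      h * (goRA h rest ((rp.length : Int) + 1) - goLA h rp ((rp.length : Int) - 1) - 1)
        + refSum (h :: rp) rest

-- naive per-bar left boundaries
def natLg (rp : List Int) : List Int → List Int
  | [] => []
  | h :: rest => goLA h rp ((rp.length : Int) - 1) :: natLg (h :: rp) rest

-- naive per-bar right boundaries, forward order, with right context pre-tail ++ suffix
def natRg (i : Int) (suffix : List Int) : List Int → List Int
  | [] => []
  | h :: pre => goRA h (pre ++ suffix) (i + 1) :: natRg (i + 1) suffix pre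

-- naive right boundaries in reversed processing order (head = last bar)
def revNatR (i : Int) (suffix : List Int) : List Int → List Int
  | [] => []
  | h :: rev => goRA h suffix (i + 1) :: revNatR (i - 1) (h :: suffix) rev

lemma popAll_popAll (x y : Int) (hxy : x ≤ y) (s : List (Int × Int)) :
    popAll x (popAll y s) = popAll x s := by
  induction s with
  | nil => rfl
  | cons p s ih =>
    obtain ⟨j, v⟩ := p
    by_cases hv : v ≥ y
    · have hvx : v ≥ x := le_trans hxy hv
      simp [popAll, hv, hvx, ih]
    · simp only [popAll, if_neg hv]

lemma passL_spec : ∀ (rest : List Int) (rp : List Int) (stack : List (Int × Int)),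
    (∀ x, topIdx (-1) (popAll x stack) = goLA x rp ((rp.length : Int) - 1)) →
    passL (rp.length : Int) stack rest = natLg rp rest := by
  intro rest
  induction rest with
  | nil => intro rp stack _; rfl
  | cons h rest ih =>
    intro rp stack hinv
    simp only [passL, natLg, hinv h]
    refine congrArg _ ?_
    have hnew : ∀ x, topIdx (-1) (popAll x (((rp.length : Int), h) :: popAll h stack))
        = goLA x (h :: rp) (((h :: rp).length : Int) - 1) := by
      intro x
      by_cases hx : h ≥ x
      · have hx' : x ≤ h := hx
        simp [popAll, goLA, hx, popAll_popAll x h hx', hinv x]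
      · simp [popAll, goLA, hx, topIdx]
    have := ih (h :: rp) (((rp.length : Int), h) :: popAll h stack) hnew
    simp only [List.length_cons] at this
    rw [show ((rp.length : Int) + 1) = (((rp.length + 1 : Nat)) : Int) by push_cast; ring]
    exact this

lemma passR_spec (n : Int) : ∀ (rev : List Int) (suffix : List Int) (stack : List (Int × Int)) (i : Int),
    (∀ x, topIdx n (popAll x stack) = goRA x suffix (i + 1)) →
    passR n i stack rev = revNatR i suffix rev := by
  intro rev
  induction rev with
  | nil => intro _ _ _ _; rfl
  | cons h rev ih =>
    intro suffix stack i hinv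
    simp only [passR, revNatR, hinv h]
    refine congrArg _ ?_
    apply ih (h :: suffix) _ (i - 1)
    intro x
    by_cases hx : h ≥ x
    · have hx' : x ≤ h := hx
      have e : i - 1 + 1 = i := by ring
      simp [popAll, goRA, hx, popAll_popAll x h hx', hinv x, e]
    · simp [popAll, goRA, hx, topIdx]

lemma natRg_append_singleton : ∀ (pre : List Int) (j : Int) (h : Int) (suffix : List Int),
    natRg j suffix (pre ++ [h])
      = natRg j (h :: suffix) pre ++ [goRA h suffix (j + (pre.length : Int) + 1)] := by
  intro pre
  induction pre with
  | nil => intro j h suffix; simp [natRg]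
  | cons a pre ih =>
    intro j h suffix
    simp only [List.cons_append, natRg, List.append_assoc, ih, List.nil_append,
      List.length_cons]
    push_cast
    ring_nf

lemma revNatR_eq : ∀ (rev : List Int) (suffix : List Int) (i : Int),
    revNatR i suffix rev = (natRg (i + 1 - (rev.length : Int)) suffix rev.reverse).reverse := by
  intro rev
  induction rev with
  | nil => intro _ _; rfl
  | cons h rev ih =>
    intro suffix i
    simp only [revNatR, List.reverse_cons, ih]
    rw [natRg_append_singleton]
    simp only [List.reverse_append, List.reverse_cons, List.reverse_nil, List.length_reverse,
      List.nil_append, List.length_cons, List.singleton_append]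
    push_cast
    ring_nf

lemma zip_fold_refSum : ∀ (rest rp : List Int) (c : Int),
    (rest.zip ((natLg rp rest).zip (natRg (rp.length : Int) [] rest))).foldl
      (fun c p => c + p.1 * (p.2.2 - p.2.1 - 1)) c = c + refSum rp rest := by
  intro rest
  induction rest with
  | nil => intro rp c; simp [natLg, natRg, refSum]
  | cons h rest ih =>
    intro rp c
    simp only [natLg, natRg, refSum, List.zip_cons_cons, List.foldl_cons, List.append_nil]
    rw [show ((rp.length : Int) + 1) = (((h :: rp).length : Nat) : Int) by simp]
    rw [ih (h :: rp)]
    ring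

-- per-index value of A's fold
def termA (hs : List Int) (i : Nat) : Int :=
  (hs.getD i 0) * (goRA (hs.getD i 0) (hs.drop (i + 1)) ((i : Int) + 1)
    - goLA (hs.getD i 0) ((hs.take i).reverse) ((i : Int) - 1) - 1)

lemma A_eq_sum (hs : List Int) :
    largestRectangleArea1 hs = ((List.range hs.length).map (termA hs)).sum := by
  have h1 : largestRectangleArea1 hs
      = (List.range hs.length).foldl (fun cnt i => cnt + termA hs i) 0 := by
    unfold largestRectangleArea1 termA
    rfl
  rw [h1, PySem.List.foldl_add (List.range hs.length) (termA hs) 0]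
  simp

lemma refSum_eq_sum : ∀ (rest rp : List Int),
    refSum rp rest = ((List.range rest.length).map (fun k =>
      (rest.getD k 0) * (goRA (rest.getD k 0) (rest.drop (k + 1)) (((rp.length + k : Nat) : Int) + 1)
        - goLA (rest.getD k 0) ((rest.take k).reverse ++ rp) (((rp.length + k : Nat) : Int) - 1) - 1))).sum := by
  intro rest
  induction rest with
  | nil => intro rp; simp [refSum]
  | cons h rest ih =>
    intro rp
    simp only [refSum, List.length_cons, List.range_succ_eq_map, List.map_cons, List.map_map,
      List.sum_cons]
    refine congrArg₂ (· + ·) ?_ ?_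
    · simp [List.getD]
    · rw [ih (h :: rp)]
      refine congrArg _ ?_
      apply List.map_congr_left
      intro k _
      simp only [Function.comp_apply, List.getD_cons_succ, List.drop_succ_cons, List.take_succ_cons,
        List.reverse_cons, List.append_assoc, List.singleton_append, List.length_cons,
        Nat.succ_eq_add_one]
      push_cast
      ring_nf

lemma A_eq_refSum (hs : List Int) : largestRectangleArea1 hs = refSum [] hs := by
  rw [A_eq_sum, refSum_eq_sum hs []]
  refine congrArg _ ?_
  apply List.map_congr_left
  intro k _
  simp [termA]

lemma B_eq_refSum (hs : List Int) : largestRectangleArea1_alt hs = refSum [] hs := by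
  unfold largestRectangleArea1_alt
  have hL : passL 0 [] hs = natLg [] hs := by
    have := passL_spec hs [] [] (by intro x; simp [popAll, topIdx, goLA])
    simpa using this
  have hR : passR (hs.length : Int) ((hs.length : Int) - 1) [] hs.reverse
      = revNatR ((hs.length : Int) - 1) [] hs.reverse := by
    apply passR_spec
    intro x
    simp [popAll, topIdx, goRA]
  have hR2 : (passR (hs.length : Int) ((hs.length : Int) - 1) [] hs.reverse).reverse
      = natRg 0 [] hs := by
    rw [hR, revNatR_eq]
    simp
  simp only [hL, hR2]
  have := zip_fold_refSum hs [] 0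
  simpa using this

-- ===== VERDICT (by name: the statement is the Claim_ definition above) =====
theorem largestRectangleArea1_spec : Claim_equal_largestRectangleArea1 := by
  intro heights _
  unfold Spec_largestRectangleArea1
  rw [A_eq_refSum, B_eq_refSum]
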